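-- pv_equiv track=rewrite | github.com/PythonHackerr/Gym-Progress-Tracker | helpers.py | merge_elements_with_x
-- ===== SOURCE A (Python) =====
-- def merge_elements_with_x(input_list):
--     merged_list = []
--     for i in range(len(input_list)):
--         if 'x' in input_list[i]:
--             if merged_list:
--                 merged_list[-1] += " " + input_list[i]
--         else:
--             merged_list.append(input_list[i])
--     return merged_list
-- ===== SOURCE B (Python) =====
-- def merge_elements_with_x(input_list):
--     # Scan right-to-left: collect a buffer of trailing 'x'-items, flush it onto
--     # each non-'x' anchor; leading 'x'-items with no anchor are dropped (as in A).
--     res = []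
--     buf = ''
--     for item in reversed(input_list):
--         if 'x' in item:
--             buf = ' ' + item + buf
--         else:
--             res.append(item + buf)
--             buf = ''
--     return res[::-1]
-- ===== Notes on version B (the rewrite author's own statement) =====
-- stated objective: alternative
-- what changed: B scans the list right-to-left with a string buffer of pending 'x'-items flushed onto each anchor and reverses the result, instead of A's forward scan that mutates the last element of the output in place.
import Mathlib
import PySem

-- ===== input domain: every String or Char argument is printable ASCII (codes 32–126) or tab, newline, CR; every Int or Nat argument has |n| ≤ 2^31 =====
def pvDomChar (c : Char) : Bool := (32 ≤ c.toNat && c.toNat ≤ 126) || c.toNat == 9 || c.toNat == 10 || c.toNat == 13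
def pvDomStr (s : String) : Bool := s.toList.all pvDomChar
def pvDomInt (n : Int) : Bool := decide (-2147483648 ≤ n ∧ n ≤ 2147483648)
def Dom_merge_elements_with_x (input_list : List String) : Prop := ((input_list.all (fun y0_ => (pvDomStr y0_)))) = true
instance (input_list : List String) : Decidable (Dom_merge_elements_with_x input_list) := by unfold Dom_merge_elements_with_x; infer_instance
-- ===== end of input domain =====

-- B replaces A's forward scan (which mutates the last output element in place) by a
-- right-to-left scan carrying a buffer of pending 'x'-items, flushed onto each anchor;
-- objective: alternative (same cost, different traversal and state).

-- ===== PORT A =====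
-- the loop 'for i in range(len(input_list))' reading input_list[i] in order, with state merged_list
def mergeA_loop (acc : List String) (xs : List String) : List String :=
  match xs with
  | [] => acc
  | s :: t =>
    if PySem.Str.isIn "x" s then        -- 'x' in input_list[i]
      match acc with
      | [] => mergeA_loop acc t         -- 'if merged_list:' false: nothing happens
      | _ :: _ =>                       -- merged_list[-1] += " " + input_list[i]
        mergeA_loop (acc.dropLast ++ [acc.getLast! ++ " " ++ s]) t
    else
      mergeA_loop (acc ++ [s]) t        -- merged_list.append(input_list[i])

def merge_elements_with_x (input_list : List String) : List String :=
  mergeA_loop [] input_list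

-- ===== PORT B =====
-- one loop step of Source B's 'for item in reversed(input_list)' over state (res, buf)
def mergeB_step (p : List String × String) (item : String) : List String × String :=
  if PySem.Str.isIn "x" item then (p.1, " " ++ item ++ p.2)
  else (p.1 ++ [item ++ p.2], "")

def merge_elements_with_x_alt (input_list : List String) : List String :=
  -- reversed(input_list) = .reverse; res[::-1] = .reverse (PySem.List.slice?_none_none_neg_one)
  (input_list.reverse.foldl mergeB_step ([], "")).1.reverse

-- ===== PRECONDITION & SPEC =====
def Spec_merge_elements_with_x (input_list : List String) (out : List String) : Prop := out = merge_elements_with_x_alt input_list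
instance (input_list : List String) (out : List String) : Decidable (Spec_merge_elements_with_x input_list out) := by unfold Spec_merge_elements_with_x; infer_instance

-- ===== CLAIM (what is proved, stated in full; the proofs are below) =====
def Claim_equal_merge_elements_with_x : Prop := ∀ (input_list : List String), Dom_merge_elements_with_x input_list → Spec_merge_elements_with_x input_list (merge_elements_with_x input_list)

-- ===== LEMMAS AND PROOFS =====

-- common characterisation: (groups of xs, buffer = leading run of 'x'-items of xs)
def mergeG (xs : List String) : List String × String :=
  match xs with
  | [] => ([], "")
  | s :: t =>
    let p := mergeG t
    if PySem.Str.isIn "x" s then (p.1, " " ++ s ++ p.2)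
    else ((s ++ p.2) :: p.1, "")

theorem pv_getLast!_concat (init : List String) (last : String) :
    (init ++ [last]).getLast! = last := by
  cases init with
  | nil => rfl
  | cons a t => simp [List.getLast!]

theorem mergeA_loop_concat (xs : List String) :
    ∀ (init : List String) (last : String),
      mergeA_loop (init ++ [last]) xs = init ++ (last ++ (mergeG xs).2) :: (mergeG xs).1 := by
  induction xs with
  | nil => intro init last; simp [mergeA_loop, mergeG]
  | cons s t ih =>
    intro init last
    have hx : ("x" : String).toList = ['x'] := rfl
    rw [mergeA_loop.eq_def]
    by_cases h : PySem.Chars.isIn ['x'] s.toList = true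
    · cases hc : init ++ [last] with
      | nil => simp at hc
      | cons a r =>
        rw [← hc]
        simp only [hc, PySem.Str.isIn, hx, h, if_true]
        rw [← hc, List.dropLast_concat, pv_getLast!_concat, String.append_assoc, ih]
        simp [mergeG, h, String.append_assoc]
    · cases hc : init ++ [last] with
      | nil => simp at hc
      | cons a r =>
        rw [← hc]
        simp only [hc, PySem.Str.isIn, hx, h]
        rw [← hc, ih (init ++ [last]) s]
        simp [mergeG, h]

theorem mergeA_loop_nil (xs : List String) : mergeA_loop [] xs = (mergeG xs).1 := by
  induction xs with
  | nil => simp [mergeA_loop, mergeG]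
  | cons s t ih =>
    have hx : ("x" : String).toList = ['x'] := rfl
    rw [mergeA_loop.eq_def]
    by_cases h : PySem.Chars.isIn ['x'] s.toList = true
    · simp only [PySem.Str.isIn, hx, h, if_true]
      rw [ih]; simp [mergeG, h]
    · simp only [PySem.Str.isIn, hx, h]
      have h1 := mergeA_loop_concat t ([] : List String) s
      simp only [List.nil_append] at h1
      simp only [List.nil_append, h1]
      simp [mergeG, h]

theorem mergeB_fold_eq (xs : List String) :
    xs.reverse.foldl mergeB_step ([], "") = ((mergeG xs).1.reverse, (mergeG xs).2) := by
  induction xs with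
  | nil => simp [mergeG]
  | cons s t ih =>
    have hx : ("x" : String).toList = ['x'] := rfl
    rw [List.reverse_cons, List.foldl_append, ih]
    by_cases h : PySem.Chars.isIn ['x'] s.toList = true
    · simp [mergeB_step, mergeG, PySem.Str.isIn, hx, h]
    · simp [mergeB_step, mergeG, PySem.Str.isIn, hx, h]

-- ===== VERDICT (by name: the statement is the Claim_ definition above) =====
theorem merge_elements_with_x_spec : Claim_equal_merge_elements_with_x := by
  intro input_list _
  unfold Spec_merge_elements_with_x merge_elements_with_x merge_elements_with_x_alt
  rw [mergeA_loop_nil, mergeB_fold_eq]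
  simp
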